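-- pv_equiv track=rewrite | github.com/zhenglei2025/open-notebook | api/routers/models.py | _get_preferred_model
-- ===== SOURCE A (Python) =====
-- from typing import Dict, List, Optional
--
-- def _get_preferred_model(
--     models: List[Dict], provider_priority: List[str], model_preferences: Dict
-- ) -> Optional[Dict]:
--     """
--     Select the best model from a list based on provider priority and model preferences.
--
--     Args:
--         models: List of model dictionaries with 'provider', 'name', 'id' keys
--         provider_priority: List of providers in preference order
--         model_preferences: Dict mapping provider to list of preferred model name patterns
--
--     Returns:
--         The best model dict, or None if no models available
--     """
--     if not models:
--         return None
--
--     # Group models by provider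
--     by_provider: Dict[str, List[Dict]] = {}
--     for model in models:
--         provider = model.get("provider", "")
--         if provider not in by_provider:
--             by_provider[provider] = []
--         by_provider[provider].append(model)
--
--     # Find first provider with models (in priority order)
--     for provider in provider_priority:
--         if provider in by_provider:
--             provider_models = by_provider[provider]
--
--             # Check for preferred models within this provider
--             if provider in model_preferences:
--                 for preference in model_preferences[provider]:
--                     for model in provider_models:
--                         if preference.lower() in model.get("name", "").lower():
--                             return model
--
--             # Fall back to first model from this provider
--             return provider_models[0]
--
--     # Fall back to first model from any provider
--     return models[0] if models else None
-- ===== SOURCE B (Python) =====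
-- from typing import Dict, List, Optional
--
-- def _get_preferred_model(
--     models: List[Dict], provider_priority: List[str], model_preferences: Dict
-- ) -> Optional[Dict]:
--     """Select the best model by scoring every model once with a
--     (provider_rank, preference_rank, position) triple and keeping the minimum,
--     instead of grouping by provider and nesting priority/preference loops."""
--     if not models:
--         return None
--
--     rank = {}
--     for k, p in enumerate(provider_priority):
--         if p not in rank:
--             rank[p] = k
--
--     def pref_rank(prefs, lname):
--         for j, q in enumerate(prefs):
--             if q.lower() in lname:
--                 return j
--         return len(prefs)
--
--     def score(i, m):
--         provider = m.get("provider", "")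
--         k = rank.get(provider)
--         if k is None:
--             return (len(provider_priority), 0, i)
--         prefs = model_preferences.get(provider, [])
--         return (k, pref_rank(prefs, m.get("name", "").lower()), i)
--
--     best = None
--     best_score = None
--     for i, m in enumerate(models):
--         s = score(i, m)
--         if best_score is None or s < best_score:
--             best, best_score = m, s
--     return best
-- ===== Notes on version B (the rewrite author's own statement) =====
-- stated objective: alternative
-- what changed: Replaces A's group-by-provider dict plus nested priority/preference/model loops with a single pass that scores every model once with a (provider_rank, preference_rank, position) triple (provider ranks precomputed in a dict) and keeps the lexicographic minimum.
import Mathlib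
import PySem

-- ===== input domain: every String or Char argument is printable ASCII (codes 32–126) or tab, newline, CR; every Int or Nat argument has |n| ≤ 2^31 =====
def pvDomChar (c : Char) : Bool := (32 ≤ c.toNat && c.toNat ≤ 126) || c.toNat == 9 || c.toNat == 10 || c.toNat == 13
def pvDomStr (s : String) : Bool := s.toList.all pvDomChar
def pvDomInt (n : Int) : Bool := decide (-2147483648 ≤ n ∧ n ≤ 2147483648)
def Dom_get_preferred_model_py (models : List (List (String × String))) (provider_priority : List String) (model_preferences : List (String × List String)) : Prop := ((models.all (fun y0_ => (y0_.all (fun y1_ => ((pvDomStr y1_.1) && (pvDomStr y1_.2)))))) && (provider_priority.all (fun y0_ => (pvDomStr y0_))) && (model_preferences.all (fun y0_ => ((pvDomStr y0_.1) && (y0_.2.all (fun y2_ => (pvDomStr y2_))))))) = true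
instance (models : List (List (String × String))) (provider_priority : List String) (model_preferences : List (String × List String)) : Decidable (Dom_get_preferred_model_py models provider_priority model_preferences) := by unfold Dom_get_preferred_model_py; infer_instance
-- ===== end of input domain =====

-- B replaces A's group-by-provider dict and nested priority/preference loops by a single
-- scored pass: each model gets a (provider_rank, preference_rank, position) triple and the
-- lexicographically smallest one wins; return values proved equal.

-- ===== PORT A =====
-- model.get(key, dflt) on a model dict
def pvGetA (m : List (String × String)) (k dflt : String) : String :=
  (PySem.Dict.mk m).getD k dflt

-- one iteration of A's grouping loop: ensure the provider key exists, then append the model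
def pvStepA (d : PySem.Dict String (List (List (String × String)))) (m : List (String × String)) :
    PySem.Dict String (List (List (String × String))) :=
  (if d.contains (pvGetA m "provider" "") then d
   else d.insert (pvGetA m "provider" "") []).modify (pvGetA m "provider" "") [] (· ++ [m])

-- 'for preference in …: for model in provider_models: if preference.lower() in model.get("name","").lower(): return model'
def pvFindPrefA (prefs : List String) (pm : List (List (String × String))) :
    Option (List (String × String)) :=
  match prefs with
  | [] => none
  | pref :: rest =>
    match pm.find? (fun m => PySem.Str.isIn (PySem.Str.lower pref) (PySem.Str.lower (pvGetA m "name" ""))) with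
    | some m => some m
    | none => pvFindPrefA rest pm

-- 'for provider in provider_priority: …' over the grouping dict, then the final fallback line
def pvLoopA (models : List (List (String × String))) (model_preferences : List (String × List String))
    (d : PySem.Dict String (List (List (String × String)))) :
    List String → Option (List (String × String))
  | [] => if models.isEmpty then none else PySem.List.pyGet? models 0
  | provider :: rest =>
    if d.contains provider then
      let provider_models := d.getD provider []
      match (match (PySem.Dict.mk model_preferences).get? provider with
             | some prefs => pvFindPrefA prefs provider_models
             | none => none) with
      | some m => some m
      | none => PySem.List.pyGet? provider_models 0
    else pvLoopA models model_preferences d rest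

def get_preferred_model_py (models : List (List (String × String))) (provider_priority : List String) (model_preferences : List (String × List String)) : Option (List (String × String)) :=
  if models.isEmpty then none
  else pvLoopA models model_preferences (models.foldl pvStepA PySem.Dict.empty) provider_priority

-- ===== PORT B =====
def pvGetB (m : List (String × String)) (k dflt : String) : String :=
  (PySem.Dict.mk m).getD k dflt

-- 'rank = {}; for k, p in enumerate(provider_priority): if p not in rank: rank[p] = k'
def pvRankDict (pp : List String) : PySem.Dict String Int :=
  (PySem.List.enumerate pp).foldl
    (fun d kp => if d.contains kp.2 then d else d.insert kp.2 kp.1) PySem.Dict.empty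

-- 'for j, q in enumerate(prefs): if q.lower() in lname: return j / return len(prefs)'
def pvPrefRank : List String → String → Nat
  | [], _ => 0
  | q :: rest, lname =>
    if PySem.Str.isIn (PySem.Str.lower q) lname then 0 else pvPrefRank rest lname + 1

-- score(i, m) = (provider_rank, preference_rank, position)
def pvScore (pp : List String) (mp : List (String × List String)) (rank : PySem.Dict String Int)
    (i : Int) (m : List (String × String)) : Int × Nat × Int :=
  let provider := pvGetB m "provider" ""
  match rank.get? provider with
  | none => ((pp.length : Int), 0, i)
  | some k =>
    (k, pvPrefRank ((PySem.Dict.mk mp).getD provider []) (PySem.Str.lower (pvGetB m "name" "")), i)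

-- Python's lexicographic '<' on the score triples
def pvLt (a b : Int × Nat × Int) : Bool :=
  decide (a.1 < b.1) ||
    (a.1 == b.1 && (decide (a.2.1 < b.2.1) || (a.2.1 == b.2.1 && decide (a.2.2 < b.2.2))))

-- 'if best_score is None or s < best_score: best, best_score = m, s'
def pvBestStep (pp : List String) (mp : List (String × List String)) (rank : PySem.Dict String Int)
    (acc : Option ((Int × Nat × Int) × List (String × String))) (im : Int × List (String × String)) :
    Option ((Int × Nat × Int) × List (String × String)) :=
  let s := pvScore pp mp rank im.1 im.2
  match acc with
  | none => some (s, im.2)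
  | some b => if pvLt s b.1 then some (s, im.2) else some b

def get_preferred_model_py_alt (models : List (List (String × String))) (provider_priority : List String) (model_preferences : List (String × List String)) : Option (List (String × String)) :=
  if models.isEmpty then none
  else
    ((PySem.List.enumerate models).foldl
        (pvBestStep provider_priority model_preferences (pvRankDict provider_priority)) none).map (·.2)

-- ===== PRECONDITION & SPEC =====
def Spec_get_preferred_model_py (models : List (List (String × String))) (provider_priority : List String) (model_preferences : List (String × List String)) (out : Option (List (String × String))) : Prop := out = get_preferred_model_py_alt models provider_priority model_preferences
instance (models : List (List (String × String))) (provider_priority : List String) (model_preferences : List (String × List String)) (out : Option (List (String × String))) : Decidable (Spec_get_preferred_model_py models provider_priority model_preferences out) := by unfold Spec_get_preferred_model_py; infer_instance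

-- ===== CLAIM (what is proved, stated in full; the proofs are below) =====
def Claim_equal_get_preferred_model_py : Prop := ∀ (models : List (List (String × String))) (provider_priority : List String) (model_preferences : List (String × List String)), Dom_get_preferred_model_py models provider_priority model_preferences → Spec_get_preferred_model_py models provider_priority model_preferences (get_preferred_model_py models provider_priority model_preferences)

-- ===== LEMMAS AND PROOFS =====

-- proof-only intermediate form of A: per-provider filter loop (no grouping dict)
def pvLoopI (models : List (List (String × String))) (mp : List (String × List String)) :
    List String → Option (List (String × String))
  | [] => if models.isEmpty then none else PySem.List.pyGet? models 0
  | p :: rest =>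
    let pm := models.filter (fun m => pvGetA m "provider" "" == p)
    if pm.isEmpty then pvLoopI models mp rest
    else
      match pvFindPrefA ((PySem.Dict.mk mp).getD p []) pm with
      | some m => some m
      | none => PySem.List.pyGet? pm 0

-- proof-only: the first index of a provider in the priority list
def pvProvRank : List String → String → Option Nat
  | [], _ => none
  | p :: rest, prov => if p == prov then some 0 else (pvProvRank rest prov).map (· + 1)

-- proof-only: the score written with pvProvRank instead of the rank dict
def pvScoreSpec (pp : List String) (mp : List (String × List String)) (i : Int)
    (m : List (String × String)) : Int × Nat × Int :=
  let provider := pvGetB m "provider" ""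
  match pvProvRank pp provider with
  | none => ((pp.length : Int), 0, i)
  | some k =>
    ((k : Int), pvPrefRank ((PySem.Dict.mk mp).getD provider []) (PySem.Str.lower (pvGetB m "name" "")), i)

theorem pvGetB_eq : pvGetB = pvGetA := rfl

-- the rank dict holds exactly the first index of each provider
theorem pvRankFold_get? (pp : List String) (s : Int) (d : PySem.Dict String Int) (c : String) :
    ((PySem.List.enumerate pp s).foldl
        (fun d kp => if d.contains kp.2 then d else d.insert kp.2 kp.1) d).get? c =
      if d.contains c = true then d.get? c else (pvProvRank pp c).map (fun n => s + n) := by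
  induction pp generalizing s d with
  | nil =>
    simp only [PySem.List.enumerate_nil, List.foldl_nil, pvProvRank]
    by_cases hc : d.contains c = true
    · simp [hc]
    · rw [if_neg hc]
      rw [PySem.Dict.contains_eq_isSome_get?] at hc
      simp only [Bool.not_eq_true, Option.isSome_eq_false_iff, Option.isNone_iff_eq_none] at hc
      simp [hc]
  | cons p rest ih =>
    rw [PySem.List.enumerate_cons]
    simp only [List.foldl_cons]
    by_cases hp : d.contains p = true
    · rw [if_pos hp, ih]
      by_cases hc : d.contains c = true
      · simp [hc]
      · have hcp : ¬(p == c) = true := by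
          intro he
          exact hc ((beq_iff_eq.mp he) ▸ hp)
        simp only [hc, if_false, pvProvRank, hcp, Bool.false_eq_true]
        cases pvProvRank rest c
        · simp
        · simp; ring
    · rw [if_neg hp, ih]
      by_cases hcp : c = p
      · subst hcp
        simp only [PySem.Dict.contains_insert, BEq.refl, Bool.true_or,
          PySem.Dict.get?_insert_self, pvProvRank, BEq.refl, if_true, hp]
        simp
      · have h1 : (d.insert p s).contains c = d.contains c := by
          rw [PySem.Dict.contains_insert]
          simp [hcp]
        rw [h1]
        by_cases hc : d.contains c = true
        · simp only [hc, if_true]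
          rw [PySem.Dict.get?_insert]
          simp [hcp]
        · have hpc : ¬(p == c) = true := by simp [Ne.symm hcp]
          simp only [hc, if_false, pvProvRank, hpc, Bool.false_eq_true]
          cases pvProvRank rest c
          · simp
          · simp; ring

theorem pvRankDict_get? (pp : List String) (c : String) :
    (pvRankDict pp).get? c = (pvProvRank pp c).map (fun n => (n : Int)) := by
  rw [pvRankDict, pvRankFold_get?]
  simp only [PySem.Dict.contains_empty, Bool.false_eq_true, if_false]
  cases pvProvRank pp c <;> simp

-- the scored pass computes pvScoreSpec
theorem pvScore_eq (pp : List String) (mp : List (String × List String)) (i : Int)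
    (m : List (String × String)) :
    pvScore pp mp (pvRankDict pp) i m = pvScoreSpec pp mp i m := by
  simp only [pvScore, pvScoreSpec, pvRankDict_get?]
  cases pvProvRank pp (pvGetB m "provider" "") <;> simp


-- ---- step 1: A's grouping loop equals the filter loop pvLoopI ----
theorem pvStepA_getD (d : PySem.Dict String (List (List (String × String)))) (m : List (String × String)) (c : String) :
    (pvStepA d m).getD c [] = d.getD c [] ++ (if pvGetA m "provider" "" = c then [m] else []) := by
  unfold pvStepA
  by_cases h : d.contains (pvGetA m "provider" "") = true
  · rw [if_pos h]
    simp only [PySem.Dict.getD_modify]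
    by_cases hc : c = pvGetA m "provider" ""
    · subst hc; simp
    · simp [hc, Ne.symm hc]
  · rw [if_neg h]
    simp only [PySem.Dict.getD_modify, PySem.Dict.getD_insert]
    simp only [Bool.not_eq_true] at h
    by_cases hc : c = pvGetA m "provider" ""
    · subst hc
      simp [PySem.Dict.getD_of_not_contains d ([] : List (List (String × String))) h]
    · simp [hc, Ne.symm hc]

theorem pvGroup_getD (ms : List (List (String × String))) (d : PySem.Dict String (List (List (String × String)))) (c : String) :
    (ms.foldl pvStepA d).getD c [] = d.getD c [] ++ ms.filter (fun m => pvGetA m "provider" "" == c) := by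
  induction ms generalizing d with
  | nil => simp
  | cons m rest ih =>
    simp only [List.foldl_cons, ih, pvStepA_getD, List.filter_cons]
    by_cases hc : pvGetA m "provider" "" = c <;> simp [hc]

theorem pvStepA_contains (d : PySem.Dict String (List (List (String × String)))) (m : List (String × String)) (c : String) :
    (pvStepA d m).contains c = (c == pvGetA m "provider" "" || d.contains c) := by
  unfold pvStepA
  by_cases h : d.contains (pvGetA m "provider" "") = true
  · rw [if_pos h]
    simp only [PySem.Dict.contains_eq_decide_mem_keys, PySem.Dict.keys_modify,
      PySem.Dict.mem_keys_insert]
    by_cases hc : c = pvGetA m "provider" ""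
    · subst hc
      simp only [PySem.Dict.contains_eq_decide_mem_keys, decide_eq_true_eq] at h
      simp [h]
    · simp [hc]
  · rw [if_neg h]
    simp only [PySem.Dict.contains_eq_decide_mem_keys, PySem.Dict.keys_modify,
      PySem.Dict.mem_keys_insert]
    by_cases hc : c = pvGetA m "provider" "" <;> simp [hc]

theorem pvGroup_contains (ms : List (List (String × String))) (d : PySem.Dict String (List (List (String × String)))) (c : String) :
    (ms.foldl pvStepA d).contains c = (d.contains c || ms.any (fun m => pvGetA m "provider" "" == c)) := by
  induction ms generalizing d with
  | nil => simp
  | cons m rest ih =>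
    simp only [List.foldl_cons, ih, pvStepA_contains, List.any_cons]
    by_cases hc : c = pvGetA m "provider" ""
    · simp [hc]
    · have h1 : (pvGetA m "provider" "" == c) = false := by simp [Ne.symm hc]
      have h2 : (c == pvGetA m "provider" "") = false := by simp [hc]
      simp [h1, h2]

theorem pvFilter_isEmpty (f : List (String × String) → Bool) (ms : List (List (String × String))) :
    (ms.filter f).isEmpty = !ms.any f := by
  induction ms with
  | nil => rfl
  | cons a t iht => by_cases hf : f a <;> simp [hf, iht]

theorem pvLoopAI (models : List (List (String × String))) (mp : List (String × List String)) (pp : List String) :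
    pvLoopA models mp (models.foldl pvStepA PySem.Dict.empty) pp = pvLoopI models mp pp := by
  induction pp with
  | nil => rfl
  | cons p rest ih =>
    have hcont : (models.foldl pvStepA PySem.Dict.empty).contains p
        = models.any (fun m => pvGetA m "provider" "" == p) := by
      rw [pvGroup_contains]
      simp only [PySem.Dict.contains_empty, Bool.false_or]
    have hgetD : (models.foldl pvStepA PySem.Dict.empty).getD p []
        = models.filter (fun m => pvGetA m "provider" "" == p) := by
      rw [pvGroup_getD]
      simp only [PySem.Dict.getD_empty, List.nil_append]
    simp only [pvLoopA, pvLoopI, hcont, hgetD,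
      pvFilter_isEmpty (fun m => pvGetA m "provider" "" == p) models]
    cases models.any (fun m => pvGetA m "provider" "" == p) with
    | false =>
      simp only [Bool.not_false, if_true, Bool.false_eq_true, if_false, ih]
    | true =>
      simp only [Bool.not_true, Bool.false_eq_true, if_false, if_true]
      have hmpeq : (match (PySem.Dict.mk mp).get? p with
             | some prefs => pvFindPrefA prefs (models.filter (fun m => pvGetA m "provider" "" == p))
             | none => none)
          = pvFindPrefA ((PySem.Dict.mk mp).getD p [])
              (models.filter (fun m => pvGetA m "provider" "" == p)) := by
        cases hg : (PySem.Dict.mk mp).get? p with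
        | none => simp [PySem.Dict.getD_eq_get?_getD, hg, pvFindPrefA]
        | some prefs => simp [PySem.Dict.getD_eq_get?_getD, hg]
      rw [hmpeq]

-- ---- order facts about pvLt ----
theorem pvLt_irrefl (a : Int × Nat × Int) : pvLt a a = false := by
  simp [pvLt]

theorem pvLt_asymm (a b : Int × Nat × Int) (h : pvLt a b = true) : pvLt b a = false := by
  simp only [pvLt, Bool.or_eq_true, Bool.and_eq_true, decide_eq_true_eq, beq_iff_eq,
    Bool.or_eq_false_iff, Bool.and_eq_false_iff, decide_eq_false_iff_not, beq_eq_false_iff_ne] at *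
  omega

theorem pvLt_shift (a b : Int × Nat × Int) :
    pvLt (a.1 + 1, a.2) (b.1 + 1, b.2) = pvLt a b := by
  have h : (a.1 + 1 == b.1 + 1) = (a.1 == b.1) := by
    by_cases he : a.1 = b.1 <;> simp [he]
  simp [pvLt, h]

-- ---- the fold in B returns the unique pvLt-least scored element ----
theorem pvFold_keep (pp : List String) (mp : List (String × List String)) (rank : PySem.Dict String Int)
    (t : List (Int × List (String × String))) (s : Int × Nat × Int) (v : List (String × String))
    (h : ∀ e ∈ t, pvLt (pvScore pp mp rank e.1 e.2) s = false) :
    t.foldl (pvBestStep pp mp rank) (some (s, v)) = some (s, v) := by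
  induction t with
  | nil => rfl
  | cons x t' ih =>
    have hx := h x (List.mem_cons_self ..)
    simp only [List.foldl_cons, pvBestStep, hx, Bool.false_eq_true, if_false]
    exact ih (fun e he => h e (List.mem_cons_of_mem _ he))

theorem pvFold_improve (pp : List String) (mp : List (String × List String)) (rank : PySem.Dict String Int)
    (t : List (Int × List (String × String))) (e : Int × List (String × String))
    (he : e ∈ t)
    (hmin : ∀ e' ∈ t, e' ≠ e → pvLt (pvScore pp mp rank e.1 e.2) (pvScore pp mp rank e'.1 e'.2) = true) :
    ∀ (s : Int × Nat × Int) (v : List (String × String)),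
      pvLt (pvScore pp mp rank e.1 e.2) s = true →
      t.foldl (pvBestStep pp mp rank) (some (s, v)) = some (pvScore pp mp rank e.1 e.2, e.2) := by
  induction t with
  | nil => exact fun s v _ => absurd he (List.not_mem_nil)
  | cons x t' ih =>
    intro s v hs
    by_cases hxe : x = e
    · subst hxe
      simp only [List.foldl_cons, pvBestStep, hs, if_true]
      apply pvFold_keep
      intro e' he'
      by_cases h' : e' = x
      · subst h'; exact pvLt_irrefl _
      · exact pvLt_asymm _ _ (hmin e' (List.mem_cons_of_mem _ he') h')
    · have he2 : e ∈ t' := by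
        cases List.mem_cons.mp he with
        | inl h => exact absurd h.symm hxe
        | inr h => exact h
      have hx : pvLt (pvScore pp mp rank e.1 e.2) (pvScore pp mp rank x.1 x.2) = true :=
        hmin x (List.mem_cons_self ..) hxe
      have hmin' : ∀ e' ∈ t', e' ≠ e → pvLt (pvScore pp mp rank e.1 e.2) (pvScore pp mp rank e'.1 e'.2) = true :=
        fun e' he' => hmin e' (List.mem_cons_of_mem _ he')
      simp only [List.foldl_cons, pvBestStep]
      by_cases hc : pvLt (pvScore pp mp rank x.1 x.2) s = true
      · simp only [hc, if_true]
        exact ih he2 hmin' _ _ hx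
      · simp only [hc]
        simp only [Bool.false_eq_true, if_false]
        exact ih he2 hmin' _ _ hs

theorem pvFold_min (pp : List String) (mp : List (String × List String)) (rank : PySem.Dict String Int)
    (l : List (Int × List (String × String))) (e : Int × List (String × String))
    (he : e ∈ l)
    (hmin : ∀ e' ∈ l, e' ≠ e → pvLt (pvScore pp mp rank e.1 e.2) (pvScore pp mp rank e'.1 e'.2) = true) :
    l.foldl (pvBestStep pp mp rank) none = some (pvScore pp mp rank e.1 e.2, e.2) := by
  cases l with
  | nil => exact absurd he (List.not_mem_nil)
  | cons x t =>
    simp only [List.foldl_cons, pvBestStep]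
    by_cases hxe : x = e
    · subst hxe
      apply pvFold_keep
      intro e' he'
      by_cases h' : e' = x
      · subst h'; exact pvLt_irrefl _
      · exact pvLt_asymm _ _ (hmin e' (List.mem_cons_of_mem _ he') h')
    · have he2 : e ∈ t := by
        cases List.mem_cons.mp he with
        | inl h => exact absurd h.symm hxe
        | inr h => exact h
      exact pvFold_improve pp mp rank t e he2
        (fun e' he' => hmin e' (List.mem_cons_of_mem _ he')) _ _
        (hmin x (List.mem_cons_self ..) hxe)

-- ---- scores under a dropped priority head ----
theorem pvScore_shift (pp : List String) (mp : List (String × List String)) (i : Int)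
    (m : List (String × String)) (p : String)
    (hne : (pvGetB m "provider" "" == p) = false) :
    pvScoreSpec (p :: pp) mp i m = ((pvScoreSpec pp mp i m).1 + 1, (pvScoreSpec pp mp i m).2) := by
  have hne' : (p == pvGetB m "provider" "") = false := by
    simp only [beq_eq_false_iff_ne] at *; exact Ne.symm hne
  simp only [pvScoreSpec, pvProvRank, hne', Bool.false_eq_true, if_false]
  cases pvProvRank pp (pvGetB m "provider" "") <;> simp

theorem pvScoreSpec_fst_nonneg (pp : List String) (mp : List (String × List String)) (i : Int)
    (m : List (String × String)) : 0 ≤ (pvScoreSpec pp mp i m).1 := by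
  simp only [pvScoreSpec]
  cases pvProvRank pp (pvGetB m "provider" "") <;> simp

-- ---- the inner preference search equals the (pref_rank, index) minimum ----
theorem pvInner_best (p : String) (models : List (List (String × String))) (prefs : List String)
    (h : models.filter (fun m => pvGetA m "provider" "" == p) ≠ []) :
    ∃ (k : Nat) (hk : k < models.length),
      (pvGetA models[k] "provider" "" == p) = true ∧
      (match pvFindPrefA prefs (models.filter (fun m => pvGetA m "provider" "" == p)) with
       | some m => some m
       | none => PySem.List.pyGet? (models.filter (fun m => pvGetA m "provider" "" == p)) 0)
        = some models[k] ∧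
      ∀ (j : Nat) (hj : j < models.length), (pvGetA models[j] "provider" "" == p) = true → j ≠ k →
        (pvPrefRank prefs (PySem.Str.lower (pvGetA models[k] "name" ""))
            < pvPrefRank prefs (PySem.Str.lower (pvGetA models[j] "name" "")) ∨
         (pvPrefRank prefs (PySem.Str.lower (pvGetA models[k] "name" ""))
            = pvPrefRank prefs (PySem.Str.lower (pvGetA models[j] "name" "")) ∧ k < j)) := by
  induction prefs with
  | nil =>
    -- no preferences left: the loop falls back to the first model of the provider
    cases hpm : models.filter (fun m => pvGetA m "provider" "" == p) with
    | nil => exact absurd hpm h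
    | cons r t =>
      have hfind : models.find? (fun m => pvGetA m "provider" "" == p) = some r := by
        rw [← List.head?_filter, hpm]; rfl
      rw [List.find?_eq_some_iff_getElem] at hfind
      obtain ⟨hpr, k, hk, hkr, hlt⟩ := hfind
      refine ⟨k, hk, by rw [hkr]; exact hpr, ?_, ?_⟩
      · simp only [pvFindPrefA]
        simp [PySem.List.pyGet?, PySem.List.pyIdx?, hkr]
      · intro j hj hjp hjk
        right
        refine ⟨rfl, ?_⟩
        by_contra hlt2
        have := hlt j (by omega)
        simp [hjp] at this
  | cons pref prest ih =>
    cases hf : (models.filter (fun m => pvGetA m "provider" "" == p)).find?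
        (fun m => PySem.Str.isIn (PySem.Str.lower pref) (PySem.Str.lower (pvGetA m "name" ""))) with
    | some r =>
      -- some model of this provider matches the first preference: A returns the first such
      have hf' : models.find? (fun m => decide ((pvGetA m "provider" "" == p) = true ∧
          PySem.Str.isIn (PySem.Str.lower pref) (PySem.Str.lower (pvGetA m "name" "")) = true))
            = some r := by
        rw [← List.find?_filter]; exact hf
      rw [List.find?_eq_some_iff_getElem] at hf'
      obtain ⟨hpr, k, hk, hkr, hlt⟩ := hf'
      simp only [decide_eq_true_eq] at hpr
      have hkq : PySem.Str.isIn (PySem.Str.lower pref)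
          (PySem.Str.lower (pvGetA models[k] "name" "")) = true := by
        rw [hkr]; exact hpr.2
      refine ⟨k, hk, by rw [hkr]; exact hpr.1, ?_, ?_⟩
      · simp only [pvFindPrefA, hf, hkr]
      · intro j hj hjp hjk
        by_cases hjq : PySem.Str.isIn (PySem.Str.lower pref)
            (PySem.Str.lower (pvGetA models[j] "name" "")) = true
        · right
          refine ⟨by simp only [pvPrefRank, hkq, hjq]; simp, ?_⟩
          by_contra hlt2
          have := hlt j (by omega)
          simp only [Bool.not_eq_true', decide_eq_false_iff_not] at this
          exact this ⟨hjp, hjq⟩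
        · left
          simp only [Bool.not_eq_true] at hjq
          simp only [pvPrefRank, hkq, hjq]
          simp
    | none =>
      -- no model of this provider matches the first preference: recurse on the rest
      have hq : ∀ m ∈ models.filter (fun m => pvGetA m "provider" "" == p),
          PySem.Str.isIn (PySem.Str.lower pref) (PySem.Str.lower (pvGetA m "name" "")) = false := by
        intro m hm
        have := List.find?_eq_none.mp hf m hm
        simpa using this
      obtain ⟨k, hk, hkp, hres, hrank⟩ := ih
      refine ⟨k, hk, hkp, ?_, ?_⟩
      · simpa only [pvFindPrefA, hf] using hres
      · intro j hj hjp hjk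
        have h1 := hq _ (List.mem_filter.mpr ⟨List.getElem_mem hk, hkp⟩)
        have h2 := hq _ (List.mem_filter.mpr ⟨List.getElem_mem hj, hjp⟩)
        have := hrank j hj hjp hjk
        simp only [pvPrefRank, h1, h2]
        simp only [Bool.false_eq_true, if_false]
        omega

-- ---- the filter loop returns the unique pvLt-least scored model ----
theorem pvLoopI_best (mp : List (String × List String)) (pp : List String)
    (models : List (List (String × String))) (h : models ≠ []) :
    ∃ (k : Nat) (hk : k < models.length),
      pvLoopI models mp pp = some models[k] ∧
      ∀ (j : Nat) (hj : j < models.length), j ≠ k →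
        pvLt (pvScoreSpec pp mp (Int.ofNat k) models[k]) (pvScoreSpec pp mp (Int.ofNat j) models[j]) = true := by
  induction pp with
  | nil =>
    have hlen : 0 < models.length := List.length_pos_iff.mpr h
    refine ⟨0, hlen, ?_, ?_⟩
    · cases models with
      | nil => exact absurd rfl h
      | cons a t => simp [pvLoopI, PySem.List.pyGet?, PySem.List.pyIdx?]
    · intro j hj hjk
      simp only [pvScoreSpec, pvProvRank, pvLt]
      simp
      omega
  | cons p rest ih =>
    by_cases hpm : models.filter (fun m => pvGetA m "provider" "" == p) = []
    · -- this provider has no models: same result and shifted scores as for the tail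
      obtain ⟨k, hk, hloop, hmin⟩ := ih
      have hnp : ∀ m ∈ models, (pvGetB m "provider" "" == p) = false := by
        intro m hm
        have := List.filter_eq_nil_iff.mp hpm m hm
        simpa [pvGetB_eq] using this
      refine ⟨k, hk, ?_, ?_⟩
      · simp only [pvLoopI, hpm, List.isEmpty_nil, if_true]
        exact hloop
      · intro j hj hjk
        rw [pvScore_shift _ _ _ _ _ (hnp _ (List.getElem_mem hk)),
            pvScore_shift _ _ _ _ _ (hnp _ (List.getElem_mem hj)), pvLt_shift]
        exact hmin j hj hjk
    · -- first provider with models: the inner preference search decides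
      obtain ⟨k, hk, hkp, hres, hrank⟩ := pvInner_best p models ((PySem.Dict.mk mp).getD p []) hpm
      have hkprov : pvGetA models[k] "provider" "" = p := by simpa using hkp
      have hscorek : pvScoreSpec (p :: rest) mp (Int.ofNat k) models[k] =
          (0, pvPrefRank ((PySem.Dict.mk mp).getD p [])
                (PySem.Str.lower (pvGetA models[k] "name" "")), Int.ofNat k) := by
        simp [pvScoreSpec, pvGetB_eq, hkprov, pvProvRank]
      refine ⟨k, hk, ?_, ?_⟩
      · have hne : (models.filter (fun m => pvGetA m "provider" "" == p)).isEmpty = false := by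
          simpa [List.isEmpty_iff] using hpm
        simp only [pvLoopI, hne, Bool.false_eq_true, if_false]
        exact hres
      · intro j hj hjk
        by_cases hjp : (pvGetA models[j] "provider" "" == p) = true
        · have hjprov : pvGetA models[j] "provider" "" = p := by simpa using hjp
          have hscorej : pvScoreSpec (p :: rest) mp (Int.ofNat j) models[j] =
              (0, pvPrefRank ((PySem.Dict.mk mp).getD p [])
                    (PySem.Str.lower (pvGetA models[j] "name" "")), Int.ofNat j) := by
            simp [pvScoreSpec, pvGetB_eq, hjprov, pvProvRank]
          rw [hscorek, hscorej]
          have := hrank j hj hjp hjk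
          simp only [pvLt]
          simp
          omega
        · have hjf : (pvGetB models[j] "provider" "" == p) = false := by
            simpa [pvGetB_eq] using hjp
          rw [hscorek, pvScore_shift _ _ _ _ _ hjf]
          simp only [pvLt]
          simp
          exact Or.inl (pvScoreSpec_fst_nonneg rest mp (Int.ofNat j) models[j])

-- ===== VERDICT (by name: the statement is the Claim_ definition above) =====
theorem get_preferred_model_py_spec : Claim_equal_get_preferred_model_py := by
  intro models pp mp _
  unfold Spec_get_preferred_model_py get_preferred_model_py get_preferred_model_py_alt
  by_cases hemp : models.isEmpty
  · simp [hemp]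
  · have hne : models ≠ [] := by simpa [List.isEmpty_iff] using hemp
    simp only [hemp, Bool.false_eq_true, if_false, pvLoopAI]
    obtain ⟨k, hk, hloop, hmin⟩ := pvLoopI_best mp pp models hne
    have hmem : ((Int.ofNat k, models[k]) : Int × List (String × String)) ∈ PySem.List.enumerate models := by
      rw [PySem.List.mem_enumerate_iff]
      exact ⟨k, hk, by simp⟩
    have hfold := pvFold_min pp mp (pvRankDict pp) (PySem.List.enumerate models) (Int.ofNat k, models[k]) hmem ?_
    · rw [hloop, hfold]; rfl
    · intro e' he' hne'
      rw [PySem.List.mem_enumerate_iff] at he'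
      obtain ⟨j, hj, rfl⟩ := he'
      have hjk : j ≠ k := by
        intro hh; subst hh; exact hne' (by simp)
      have := hmin j hj hjk
      simpa [pvScore_eq] using this
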